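-- pv_equiv track=rewrite | github.com/swkim-sm/practice | codingTest/Programmers/삼각 달팽이/src.py | solution
-- ===== SOURCE A (Python) =====
-- def solution(n):
--     answer = []
--     path = [[-1, 0, 0]] # (x, y, num)
--     cur_num = 1
--     last_num = (n*(n+1))/2
--
--     flag = 0
--     for i in range(n, 0, -1):
--         for j in range(i):
--             # 좌하로 갈 때
--             if flag % 3 == 0:
--                 path.append([path[-1][0]+1, path[-1][1], path[-1][2]+1])
--             # 오른쪽으로 갈 때
--             elif flag % 3 == 1:
--                 path.append([path[-1][0], path[-1][1]+1, path[-1][2]+1])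
--             # 좌상으로 갈 때
--             else:
--                 path.append([path[-1][0]-1, path[-1][1]-1, path[-1][2]+1])
--
--         flag += 1
--     path.pop(0)
--     path = sorted(path, key=lambda x:(x[0], x[1]))
--     for x, y, n in path:
--         answer.append(n)
--     return answer
-- ===== SOURCE B (Python) =====
-- def solution(n):
--     # closed form: for each cell, its ring r = min(y, x-y, n-1-x); numbers on
--     # ring r start after the 3(n-3t)-3 cells of each outer ring t < r, i.e. at
--     # base(r) = T(n) - T(n-3r); within the ring: left edge, bottom edge, diagonal.
--     def value(x, y):
--         r = min(y, x - y, n - 1 - x)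
--         m = n - 3 * r
--         base = (n * (n + 1) - m * (m + 1)) // 2
--         if y == r:                      # left edge (walked first, downwards)
--             return base + (x - 2 * r) + 1
--         if n - 1 - x == r:              # bottom edge (walked second, rightwards)
--             return base + (m - 1) + (y - r) + 1
--         return base + 2 * m - 2 + (n - 1 - r - x) + 1   # diagonal (walked last, upwards)
--     return [value(x, y) for x in range(n) for y in range(x + 1)]
-- ===== Notes on version B (the rewrite author's own statement) =====
-- stated objective: faster
-- what changed: A simulates the snail walk cell by cell (reading path[-1]), then sorts every generated (x, y, num) triple by coordinate and projects the numbers; B computes each cell's number directly with a closed-form formula from its ring index r = min(y, x-y, n-1-x) and emits the rows in row-major order, with no simulation and no sort.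
import Mathlib
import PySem

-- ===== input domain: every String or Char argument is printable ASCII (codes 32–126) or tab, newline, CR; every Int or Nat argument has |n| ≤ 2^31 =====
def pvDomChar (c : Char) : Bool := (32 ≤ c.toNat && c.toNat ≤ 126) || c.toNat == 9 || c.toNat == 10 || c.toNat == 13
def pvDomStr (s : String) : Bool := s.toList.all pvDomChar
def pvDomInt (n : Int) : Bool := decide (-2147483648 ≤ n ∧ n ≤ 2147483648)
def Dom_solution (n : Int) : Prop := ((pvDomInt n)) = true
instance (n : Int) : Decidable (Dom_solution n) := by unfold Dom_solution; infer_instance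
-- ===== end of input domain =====

-- B replaces A's step-by-step snail walk + sort with a closed-form value per cell
-- read off row-major (objective: faster — no sort, O(1) per cell).


-- ===== PORT A =====
-- literal transliteration of A: simulate the snail path appending (x, y, num)
-- triples while reading path[-1], pop the sentinel, sort by (x, y), project num.
-- (cur_num = 1 and last_num = (n*(n+1))/2 in A are dead: never read; last_num is a float)
def solution (n : Int) : List Int :=
  let answer : List Int := []
  let path : List (Int × Int × Int) := [(-1, 0, 0)]
  let st := (PySem.List.pyRange n 0 (-1)).foldl
    (fun (st : List (Int × Int × Int) × Int) i =>
      let path := (PySem.List.pyRange 0 i 1).foldl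
        (fun path _j =>
          let last := PySem.List.pyGetD path (-1) (0, 0, 0)
          if PySem.Int.mod st.2 3 = 0 then
            path ++ [(last.1 + 1, last.2.1, last.2.2 + 1)]
          else if PySem.Int.mod st.2 3 = 1 then
            path ++ [(last.1, last.2.1 + 1, last.2.2 + 1)]
          else
            path ++ [(last.1 - 1, last.2.1 - 1, last.2.2 + 1)]) st.1
      (path, st.2 + 1)) (path, 0)
  let path := ((PySem.List.pop? st.1 0).map Prod.snd).getD []
  let path := PySem.List.sorted2 path (fun t => t.1) (fun t => t.2.1)
  path.foldl (fun answer t => answer ++ [t.2.2]) answer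

-- ===== PORT B =====
-- B's helper `value`: closed-form number of cell (x, y); r = ring index
def altValue (n x y : Int) : Int :=
  let r := min y (min (x - y) (n - 1 - x))
  let m := n - 3 * r
  let base := PySem.Int.floordiv (n * (n + 1) - m * (m + 1)) 2
  if y = r then base + (x - 2 * r) + 1
  else if n - 1 - x = r then base + (m - 1) + (y - r) + 1
  else base + 2 * m - 2 + (n - 1 - r - x) + 1

def solution_alt (n : Int) : List Int :=
  (PySem.List.pyRange 0 n 1).flatMap (fun x =>
    (PySem.List.pyRange 0 (x + 1) 1).map (fun y => altValue n x y))

-- ===== PRECONDITION & SPEC =====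
def Spec_solution (n : Int) (out : List Int) : Prop := out = solution_alt n
instance (n : Int) (out : List Int) : Decidable (Spec_solution n out) := by unfold Spec_solution; infer_instance

-- ===== CLAIM (what is proved, stated in full; the proofs are below) =====
def Claim_equal_solution : Prop := ∀ (n : Int), Dom_solution n → Spec_solution n (solution n)

-- ===== LEMMAS AND PROOFS =====

-- the cell appended j+1 steps after last element p, walking direction d (= flag % 3)
def pvCellAt (p : Int × Int × Int) (d : Nat) (j : Nat) : Int × Int × Int :=
  if d = 0 then (p.1 + ((j : Int) + 1), p.2.1, p.2.2 + ((j : Int) + 1))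
  else if d = 1 then (p.1, p.2.1 + ((j : Int) + 1), p.2.2 + ((j : Int) + 1))
  else (p.1 - ((j : Int) + 1), p.2.1 - ((j : Int) + 1), p.2.2 + ((j : Int) + 1))

def pvLegLen (n : Int) (k : Nat) : Nat := (n - k).toNat

def pvLegOf (n : Int) (p : Int × Int × Int) (k : Nat) : List (Int × Int × Int) :=
  (List.range (pvLegLen n k)).map (pvCellAt p (k % 3))

-- last element of the path after k complete legs
def pvP (n : Int) : Nat → Int × Int × Int
  | 0 => (-1, 0, 0)
  | k + 1 => (pvLegOf n (pvP n k) k).getLastD (pvP n k)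

def pvLeg (n : Int) (k : Nat) : List (Int × Int × Int) := pvLegOf n (pvP n k) k

def pvL (n : Int) : List (Int × Int × Int) := (List.range n.toNat).flatMap (pvLeg n)

def pvPath (n : Int) (t : Nat) : List (Int × Int × Int) :=
  (-1, 0, 0) :: (List.range t).flatMap (pvLeg n)

def pvOff (n : Int) : Nat → Int
  | 0 => 0
  | k + 1 => pvOff n k + (pvLegLen n k : Int)

-- closed-form position after k legs (r = k / 3)
def pvPos (n : Int) (k : Nat) : Int × Int :=
  let r : Int := (k / 3 : Nat)
  if k % 3 = 0 then (2 * r - 1, r)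
  else if k % 3 = 1 then (n - r - 1, r)
  else (n - r - 1, n - 2 * r - 1)

def pvCells (n : Int) : List (Int × Int) :=
  (PySem.List.pyRange 0 n 1).flatMap (fun x =>
    (PySem.List.pyRange 0 (x + 1) 1).map (fun y => (x, y)))

def pvTriple (n : Int) (c : Int × Int) : Int × Int × Int := (c.1, c.2, altValue n c.1 c.2)

def pvKey (t : Int × Int × Int) : Int × Int := (t.1, t.2.1)

lemma pvCellAt_num (p : Int × Int × Int) (d j : Nat) :
    (pvCellAt p d j).2.2 = p.2.2 + ((j : Int) + 1) := by
  unfold pvCellAt; split_ifs <;> rfl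

lemma getLastD_map_range {α : Type} (f : Nat → α) (L : Nat) (hL : 0 < L) (x : α) :
    ((List.range L).map f).getLastD x = f (L - 1) := by
  obtain ⟨l, rfl⟩ : ∃ l, L = l + 1 := ⟨L - 1, by omega⟩
  rw [List.range_succ, List.map_append]
  simp

lemma pvOff_succ (n : Int) (k : Nat) (hk : (k : Int) < n) :
    pvOff n (k + 1) = pvOff n k + (n - k) := by
  show pvOff n k + (pvLegLen n k : Int) = _
  unfold pvLegLen
  omega

lemma pvOff_mono (n : Int) {k k' : Nat} (h : k ≤ k') : pvOff n k ≤ pvOff n k' := by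
  induction k' with
  | zero => have : k = 0 := by omega
            simp [this]
  | succ m ih =>
    rcases Nat.lt_or_ge k (m + 1) with hlt | hge
    · calc pvOff n k ≤ pvOff n m := ih (by omega)
        _ ≤ pvOff n (m + 1) := by show _ ≤ pvOff n m + (pvLegLen n m : Int); omega
    · have : k = m + 1 := by omega
      simp [this]

lemma pvOff_closed (n : Int) (k : Nat) (hk : (k : Int) ≤ n) :
    2 * pvOff n k = 2 * k * n - k * (k - 1) := by
  induction k with
  | zero => simp [pvOff]
  | succ m ih =>
    have h1 := pvOff_succ n m (by push_cast at hk ⊢; omega)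
    have h2 : 2 * pvOff n m = 2 * m * n - m * (m - 1) := ih (by push_cast at hk ⊢; omega)
    rw [h1]
    push_cast
    push_cast at h2
    linarith [h2]

lemma pvP_num (n : Int) (k : Nat) : (pvP n k).2.2 = pvOff n k := by
  induction k with
  | zero => rfl
  | succ m ih =>
    show ((pvLegOf n (pvP n m) m).getLastD (pvP n m)).2.2 = pvOff n m + (pvLegLen n m : Int)
    unfold pvLegOf
    rcases Nat.eq_zero_or_pos (pvLegLen n m) with h0 | hpos
    · simp [h0, ih]
    · rw [getLastD_map_range _ _ hpos, pvCellAt_num, ih]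
      omega

lemma pvP_closed (n : Int) (k : Nat) (hk : (k : Int) ≤ n) :
    pvP n k = ((pvPos n k).1, (pvPos n k).2, pvOff n k) := by
  induction k with
  | zero => simp [pvP, pvPos, pvOff]
  | succ m ih =>
    have hm : (m : Int) < n := by push_cast at hk; omega
    have ihm := ih (le_of_lt hm)
    have hL : 0 < pvLegLen n m := by unfold pvLegLen; omega
    have hLeq : ((pvLegLen n m : Nat) : Int) = n - m := by unfold pvLegLen; omega
    show (pvLegOf n (pvP n m) m).getLastD (pvP n m) = _
    unfold pvLegOf
    rw [getLastD_map_range _ _ hL, ihm]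
    have hoff := pvOff_succ n m hm
    have hL1 : ((pvLegLen n m - 1 : Nat) : Int) = n - m - 1 := by omega
    rcases (by omega : m % 3 = 0 ∨ m % 3 = 1 ∨ m % 3 = 2) with h | h | h
    · have h1 : (m + 1) % 3 = 1 := by omega
      have h2 : (m + 1) / 3 = m / 3 := by omega
      simp only [pvPos, pvCellAt, h, h1, h2]
      norm_num [Prod.ext_iff]
      omega
    · have h1 : (m + 1) % 3 = 2 := by omega
      have h2 : (m + 1) / 3 = m / 3 := by omega
      simp only [pvPos, pvCellAt, h, h1, h2]
      norm_num [Prod.ext_iff]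
      omega
    · have h1 : (m + 1) % 3 = 0 := by omega
      have h2 : (m + 1) / 3 = m / 3 + 1 := by omega
      simp only [pvPos, pvCellAt, h, h1, h2]
      norm_num [Prod.ext_iff]
      omega

lemma floordiv_two_eq (X b : Int) (h : X = 2 * b) : PySem.Int.floordiv X 2 = b := by
  subst h
  show (2 * b).fdiv 2 = b
  rw [Int.mul_fdiv_cancel_left _ (by norm_num)]

lemma pvBase_eq (n : Int) (r : Nat) (hr : 3 * (r : Int) ≤ n) :
    PySem.Int.floordiv (n * (n + 1) - (n - 3 * r) * ((n - 3 * r) + 1)) 2 = pvOff n (3 * r) := by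
  apply floordiv_two_eq
  have h := pvOff_closed n (3 * r) (by push_cast; omega)
  push_cast at h
  linear_combination -h

lemma altValue_left (n : Int) (r : Nat) (x y : Int) (hy : y = (r : Int))
    (hx : 2 * (r : Int) ≤ x) (hxn : x ≤ n - 1 - r) :
    altValue n x y = pvOff n (3 * r) + (x - 2 * r) + 1 := by
  have hmin : min y (min (x - y) (n - 1 - x)) = (r : Int) := by omega
  have hr : 3 * (r : Int) ≤ n := by omega
  simp only [altValue, hmin]
  rw [if_pos hy, pvBase_eq n r hr]

lemma altValue_bottom (n : Int) (r : Nat) (x y : Int) (hx : n - 1 - x = (r : Int))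
    (hy1 : (r : Int) + 1 ≤ y) (hy2 : y ≤ n - 2 * r - 1) :
    altValue n x y = pvOff n (3 * r) + ((n - 3 * r) - 1) + (y - r) + 1 := by
  have hmin : min y (min (x - y) (n - 1 - x)) = (r : Int) := by omega
  have hr : 3 * (r : Int) ≤ n := by omega
  simp only [altValue, hmin]
  rw [if_neg (by omega), if_pos hx, pvBase_eq n r hr]

lemma altValue_diag (n : Int) (r : Nat) (x y : Int) (hxy : x - y = (r : Int))
    (hy1 : (r : Int) + 1 ≤ y) (hx : (r : Int) + 1 ≤ n - 1 - x) :
    altValue n x y = pvOff n (3 * r) + 2 * (n - 3 * r) - 2 + (n - 1 - r - x) + 1 := by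
  have hmin : min y (min (x - y) (n - 1 - x)) = (r : Int) := by omega
  have hr : 3 * (r : Int) ≤ n := by omega
  simp only [altValue, hmin]
  rw [if_neg (by omega), if_neg (by omega), pvBase_eq n r hr]

-- the heart: each cell of leg k is inside the triangle and carries the number
-- that B's closed form assigns to its coordinates
lemma pvCell_spec (n : Int) (k j : Nat) (hk : k < n.toNat) (hj : j < pvLegLen n k) :
    (0 ≤ (pvCellAt (pvP n k) (k % 3) j).2.1 ∧
      (pvCellAt (pvP n k) (k % 3) j).2.1 ≤ (pvCellAt (pvP n k) (k % 3) j).1 ∧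
      (pvCellAt (pvP n k) (k % 3) j).1 ≤ n - 1) ∧
    (pvCellAt (pvP n k) (k % 3) j).2.2 = pvOff n k + j + 1 ∧
    altValue n (pvCellAt (pvP n k) (k % 3) j).1 (pvCellAt (pvP n k) (k % 3) j).2.1
      = (pvCellAt (pvP n k) (k % 3) j).2.2 := by
  have hkn : (k : Int) < n := by omega
  have hjn : (j : Int) < n - k := by unfold pvLegLen at hj; omega
  have hj0 : (0 : Int) ≤ j := by positivity
  rw [pvP_closed n k (le_of_lt hkn)]
  rcases (by omega : k % 3 = 0 ∨ k % 3 = 1 ∨ k % 3 = 2) with h | h | h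
  · obtain ⟨r, rfl⟩ : ∃ r, k = 3 * r := ⟨k / 3, by omega⟩
    push_cast at hkn hjn
    have hcell : pvCellAt ((pvPos n (3 * r)).1, (pvPos n (3 * r)).2, pvOff n (3 * r))
        ((3 * r) % 3) j = (2 * (r : Int) + j, (r : Int), pvOff n (3 * r) + j + 1) := by
      have h0 : (3 * r) % 3 = 0 := by omega
      have hd : (3 * r) / 3 = r := by omega
      simp [pvPos, pvCellAt, h0, hd, Prod.ext_iff]
      omega
    rw [hcell]
    dsimp only
    refine ⟨⟨by omega, by omega, by omega⟩, rfl, ?_⟩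
    rw [altValue_left n r (2 * (r : Int) + j) (r : Int) rfl (by omega) (by omega)]
    omega
  · obtain ⟨r, rfl⟩ : ∃ r, k = 3 * r + 1 := ⟨k / 3, by omega⟩
    push_cast at hkn hjn
    have ho1 : pvOff n (3 * r + 1) = pvOff n (3 * r) + (n - 3 * r) := by
      rw [pvOff_succ n (3 * r) (by push_cast; omega)]; push_cast; ring
    have hcell : pvCellAt ((pvPos n (3 * r + 1)).1, (pvPos n (3 * r + 1)).2, pvOff n (3 * r + 1))
        ((3 * r + 1) % 3) j
        = (n - (r : Int) - 1, (r : Int) + j + 1, pvOff n (3 * r + 1) + j + 1) := by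
      have h0 : (3 * r + 1) % 3 = 1 := by omega
      have hd : (3 * r + 1) / 3 = r := by omega
      simp [pvPos, pvCellAt, h0, hd, Prod.ext_iff]
      omega
    rw [hcell]
    dsimp only
    refine ⟨⟨by omega, by omega, by omega⟩, rfl, ?_⟩
    rw [altValue_bottom n r (n - (r : Int) - 1) ((r : Int) + j + 1) (by omega) (by omega)
      (by omega)]
    omega
  · obtain ⟨r, rfl⟩ : ∃ r, k = 3 * r + 2 := ⟨k / 3, by omega⟩
    push_cast at hkn hjn
    have ho1 : pvOff n (3 * r + 1) = pvOff n (3 * r) + (n - 3 * r) := by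
      rw [pvOff_succ n (3 * r) (by push_cast; omega)]; push_cast; ring
    have ho2 : pvOff n (3 * r + 2) = pvOff n (3 * r + 1) + (n - 3 * r - 1) := by
      rw [show 3 * r + 2 = (3 * r + 1) + 1 from rfl, pvOff_succ n (3 * r + 1) (by push_cast; omega)]
      push_cast; ring
    have hcell : pvCellAt ((pvPos n (3 * r + 2)).1, (pvPos n (3 * r + 2)).2, pvOff n (3 * r + 2))
        ((3 * r + 2) % 3) j
        = (n - (r : Int) - j - 2, n - 2 * (r : Int) - j - 2, pvOff n (3 * r + 2) + j + 1) := by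
      have h0 : (3 * r + 2) % 3 = 2 := by omega
      have hd : (3 * r + 2) / 3 = r := by omega
      simp [pvPos, pvCellAt, h0, hd, Prod.ext_iff]
      omega
    rw [hcell]
    dsimp only
    refine ⟨⟨by omega, by omega, by omega⟩, rfl, ?_⟩
    rw [altValue_diag n r (n - (r : Int) - j - 2) (n - 2 * (r : Int) - j - 2) (by omega)
      (by omega) (by omega)]
    omega

lemma pvCellAt_succ (p : Int × Int × Int) (d j : Nat) :
    pvCellAt p d (j + 1) = pvCellAt (pvCellAt p d 0) d j := by
  unfold pvCellAt
  split_ifs <;> simp [Prod.ext_iff] <;> omega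

lemma pvMem_L (n : Int) {t : Int × Int × Int} (ht : t ∈ pvL n) :
    ∃ k j : Nat, k < n.toNat ∧ j < pvLegLen n k ∧ t = pvCellAt (pvP n k) (k % 3) j := by
  simp only [pvL, List.mem_flatMap, List.mem_range] at ht
  obtain ⟨k, hk, ht⟩ := ht
  simp only [pvLeg, pvLegOf, List.mem_map, List.mem_range] at ht
  obtain ⟨j, hj, rfl⟩ := ht
  exact ⟨k, j, hk, hj, rfl⟩

-- inner loop: one leg appends pvCellAt p d 0, 1, …
lemma pv_inner (w : Int) (d : Nat) (hd : w = (d : Int)) (hd3 : d < 3)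
    (xs : List Int) :
    ∀ (q : List (Int × Int × Int)) (p : Int × Int × Int),
    xs.foldl
      (fun path _j =>
        let last := PySem.List.pyGetD path (-1) (0, 0, 0)
        if w = 0 then
          path ++ [(last.1 + 1, last.2.1, last.2.2 + 1)]
        else if w = 1 then
          path ++ [(last.1, last.2.1 + 1, last.2.2 + 1)]
        else
          path ++ [(last.1 - 1, last.2.1 - 1, last.2.2 + 1)]) (q ++ [p])
      = (q ++ [p]) ++ (List.range xs.length).map (pvCellAt p d) := by
  induction xs with
  | nil => intro q p; simp
  | cons a rest ih =>
    intro q p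
    rw [List.foldl_cons]
    have hbody :
        (let last := PySem.List.pyGetD (q ++ [p]) (-1) (0, 0, 0)
          if w = 0 then
            (q ++ [p]) ++ [(last.1 + 1, last.2.1, last.2.2 + 1)]
          else if w = 1 then
            (q ++ [p]) ++ [(last.1, last.2.1 + 1, last.2.2 + 1)]
          else
            (q ++ [p]) ++ [(last.1 - 1, last.2.1 - 1, last.2.2 + 1)])
        = (q ++ [p]) ++ [pvCellAt p d 0] := by
      simp only [PySem.List.pyGetD_neg_one_append_singleton, hd]
      rcases (by omega : d = 0 ∨ d = 1 ∨ d = 2) with rfl | rfl | rfl <;>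
        norm_num [pvCellAt]
    rw [hbody, ih (q ++ [p]) (pvCellAt p d 0)]
    rw [List.length_cons, List.range_succ_eq_map, List.map_cons, List.map_map]
    have hmaps : (List.range rest.length).map (pvCellAt p d ∘ Nat.succ)
        = (List.range rest.length).map (pvCellAt (pvCellAt p d 0) d) :=
      List.map_congr_left (fun j _ => pvCellAt_succ p d j)
    simp [hmaps]

lemma pvPath_eq_append (n : Int) (t : Nat) (ht : t ≤ n.toNat) :
    ∃ q, pvPath n t = q ++ [pvP n t] := by
  cases t with
  | zero => exact ⟨[], rfl⟩
  | succ m =>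
    have hL : 0 < pvLegLen n m := by unfold pvLegLen; omega
    obtain ⟨l, hl⟩ : ∃ l, pvLegLen n m = l + 1 := ⟨pvLegLen n m - 1, by omega⟩
    have hleg : pvLeg n m = (List.range l).map (pvCellAt (pvP n m) (m % 3))
        ++ [pvCellAt (pvP n m) (m % 3) l] := by
      unfold pvLeg pvLegOf
      rw [hl, List.range_succ, List.map_append]
      rfl
    have hP : pvP n (m + 1) = pvCellAt (pvP n m) (m % 3) l := by
      show (pvLegOf n (pvP n m) m).getLastD (pvP n m) = _
      unfold pvLegOf
      rw [getLastD_map_range _ _ hL, hl]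
      simp
    refine ⟨(-1, 0, 0) :: ((List.range m).flatMap (pvLeg n)
      ++ (List.range l).map (pvCellAt (pvP n m) (m % 3))), ?_⟩
    unfold pvPath
    rw [List.range_succ, List.flatMap_append, hP]
    simp [hleg]

lemma pvPath_succ (n : Int) (t : Nat) : pvPath n (t + 1) = pvPath n t ++ pvLeg n t := by
  unfold pvPath
  rw [List.range_succ, List.flatMap_append]
  simp

lemma pv_outer (n : Int) :
    ∀ (m t : Nat), t + m ≤ n.toNat →
    (((List.range m).map (fun k : Nat => n - ((t : Int) + k))).foldl
      (fun (st : List (Int × Int × Int) × Int) i =>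
        let path := (PySem.List.pyRange 0 i 1).foldl
          (fun path _j =>
            let last := PySem.List.pyGetD path (-1) (0, 0, 0)
            if PySem.Int.mod st.2 3 = 0 then
              path ++ [(last.1 + 1, last.2.1, last.2.2 + 1)]
            else if PySem.Int.mod st.2 3 = 1 then
              path ++ [(last.1, last.2.1 + 1, last.2.2 + 1)]
            else
              path ++ [(last.1 - 1, last.2.1 - 1, last.2.2 + 1)]) st.1
        (path, st.2 + 1)) (pvPath n t, (t : Int)))
      = (pvPath n (t + m), ((t + m : Nat) : Int)) := by
  intro m
  induction m with
  | zero => intro t _; simp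
  | succ l ih =>
    intro t ht
    rw [List.range_succ_eq_map, List.map_cons, List.foldl_cons, List.map_map]
    have hmod : PySem.Int.mod (t : Int) 3 = ((t % 3 : Nat) : Int) := by
      simp [PySem.Int.mod, Int.fmod_eq_emod]
    obtain ⟨q, hq⟩ := pvPath_eq_append n t (by omega)
    have hlen : (PySem.List.pyRange 0 (n - ((t : Int) + ((0 : Nat) : Int))) 1).length
        = pvLegLen n t := by
      rw [PySem.List.length_pyRange_one]
      unfold pvLegLen
      norm_num
    have hstep :
        ((PySem.List.pyRange 0 (n - ((t : Int) + ((0 : Nat) : Int))) 1).foldl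
          (fun path _j =>
            let last := PySem.List.pyGetD path (-1) (0, 0, 0)
            if PySem.Int.mod (t : Int) 3 = 0 then
              path ++ [(last.1 + 1, last.2.1, last.2.2 + 1)]
            else if PySem.Int.mod (t : Int) 3 = 1 then
              path ++ [(last.1, last.2.1 + 1, last.2.2 + 1)]
            else
              path ++ [(last.1 - 1, last.2.1 - 1, last.2.2 + 1)])
          (pvPath n t)) = pvPath n (t + 1) := by
      rw [hq, pv_inner (PySem.Int.mod (t : Int) 3) (t % 3) hmod (by omega), hlen, ← hq,
        pvPath_succ]
      rfl
    rw [show t + (l + 1) = (t + 1) + l from by omega]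
    rw [← ih (t + 1) (by omega)]
    have hlist : (List.range l).map ((fun k : Nat => n - ((t : Int) + k)) ∘ Nat.succ)
        = (List.range l).map (fun k : Nat => n - (((t + 1 : Nat) : Int) + k)) :=
      List.map_congr_left (fun k _ => by simp; ring)
    rw [hlist]
    congr 1
    dsimp only
    rw [hstep]
    simp

lemma pv_solution_eq (n : Int) :
    solution n = (PySem.List.sorted2 (pvL n) (fun t => t.1) (fun t => t.2.1)).map
      (fun t => t.2.2) := by
  simp only [solution]
  rw [PySem.List.pyRange_neg_one]
  have hlist : (List.range (n - 0).toNat).map (fun k : Nat => n - (k : Int))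
      = (List.range n.toNat).map (fun k : Nat => n - (((0 : Nat) : Int) + k)) := by
    norm_num
  rw [hlist, show ([((-1 : Int), (0 : Int), (0 : Int))], (0 : Int))
      = (pvPath n 0, ((0 : Nat) : Int)) from rfl,
    pv_outer n n.toNat 0 (by omega)]
  dsimp only
  rw [show pvPath n (0 + n.toNat) = (-1, 0, 0) :: pvL n from by unfold pvPath pvL; norm_num,
    PySem.List.pop?_zero_cons]
  simp only [Option.map_some, Option.getD_some]
  rw [PySem.List.foldl_append_singleton_eq_map]
  simp

lemma pv_sorted2_eq_sorted_lex {α : Type} (xs : List α) (k1 k2 : α → Int) :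
    PySem.List.sorted2 xs k1 k2
      = PySem.List.sorted xs (fun a => toLex (k1 a, k2 a)) := by
  unfold PySem.List.sorted2 PySem.List.sorted
  dsimp only
  congr 1
  funext acc x
  congr 1
  funext a b
  rcases lt_trichotomy (k1 a) (k1 b) with h | h | h
  all_goals simp [Prod.Lex.toLex_lt_toLex, h]
  all_goals omega

lemma pvLeg_nums (n : Int) (k : Nat) :
    (pvLeg n k).map (fun t => t.2.2)
      = (List.range (pvLegLen n k)).map (fun j : Nat => pvOff n k + (j : Int) + 1) := by
  unfold pvLeg pvLegOf
  rw [List.map_map]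
  exact List.map_congr_left (fun j _ => by
    simp [Function.comp, pvCellAt_num, pvP_num]; omega)


lemma list_sum_range_eq (N : Nat) (f : Nat → Nat) :
    ((List.range N).map f).sum = ∑ k ∈ Finset.range N, f k := by
  induction N with
  | zero => rfl
  | succ m ih =>
    rw [List.range_succ, List.map_append, List.sum_append, Finset.sum_range_succ, ih]
    simp


lemma sum_range_rev (N : Nat) :
    ((List.range N).map (fun k => N - k)).sum = ((List.range N).map (fun k => k + 1)).sum := by
  rw [list_sum_range_eq, list_sum_range_eq, ← Finset.sum_range_reflect]
  refine Finset.sum_congr rfl ?_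
  intro j hj
  simp only [Finset.mem_range] at hj
  omega


lemma pvLen_eq (n : Int) : (pvCells n).length = (pvL n).length := by
  unfold pvCells pvL
  rw [List.length_flatMap, List.length_flatMap, PySem.List.pyRange_one, List.map_map]
  have hN : (n - 0).toNat = n.toNat := by norm_num
  rw [hN]
  have h1 : (List.range n.toNat).map
        ((fun x : Int => ((PySem.List.pyRange 0 (x + 1) 1).map (fun y => (x, y))).length)
          ∘ fun k : Nat => 0 + (k : Int))
      = (List.range n.toNat).map (fun k => k + 1) :=
    List.map_congr_left (fun k hk => by
      simp [Function.comp, PySem.List.length_pyRange_one]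
      try omega)
  have h2 : (List.range n.toNat).map (fun a => (pvLeg n a).length)
      = (List.range n.toNat).map (fun k => n.toNat - k) :=
    List.map_congr_left (fun k hk => by
      simp only [List.mem_range] at hk
      simp [pvLeg, pvLegOf, pvLegLen])
  rw [h1, h2]
  exact (sum_range_rev n.toNat).symm


lemma pvL_nums_eq_keys_map (n : Int) :
    (pvL n).map (fun t => t.2.2)
      = ((pvL n).map pvKey).map (fun c => altValue n c.1 c.2) := by
  rw [List.map_map]
  refine List.map_congr_left (fun t ht => ?_)
  obtain ⟨k, j, hk, hj, rfl⟩ := pvMem_L n ht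
  have h3 := (pvCell_spec n k j hk hj).2.2
  simpa [pvKey, Function.comp] using h3.symm


lemma pvNums_pairwise (n : Int) :
    ((pvL n).map (fun t => t.2.2)).Pairwise (· < ·) := by
  unfold pvL
  rw [List.map_flatMap, List.pairwise_flatMap]
  constructor
  · intro k _
    rw [pvLeg_nums]
    refine List.Pairwise.map _ ?_ List.pairwise_lt_range
    intro a b hab
    omega
  · refine List.Pairwise.imp ?_ (List.pairwise_lt_range (n := n.toNat))
    intro k k' hkk' x hx y hy
    rw [pvLeg_nums] at hx hy
    simp only [List.mem_map, List.mem_range] at hx hy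
    obtain ⟨j, hj, rfl⟩ := hx
    obtain ⟨j', hj', rfl⟩ := hy
    have h1 : pvOff n (k + 1) = pvOff n k + (pvLegLen n k : Int) := rfl
    have h2 := pvOff_mono n (show k + 1 ≤ k' by omega)
    omega

lemma pvKeys_perm (n : Int) : ((pvL n).map pvKey).Perm (pvCells n) := by
  have hnums : ((pvL n).map (fun t => t.2.2)).Nodup :=
    (pvNums_pairwise n).imp (fun h => ne_of_lt h)
  have hnodup : ((pvL n).map pvKey).Nodup := by
    refine List.Nodup.of_map (fun c => altValue n c.1 c.2) ?_
    rw [← pvL_nums_eq_keys_map]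
    exact hnums
  have hsub : ((pvL n).map pvKey) ⊆ pvCells n := by
    intro c hc
    simp only [List.mem_map] at hc
    obtain ⟨t, ht, rfl⟩ := hc
    obtain ⟨k, j, hk, hj, rfl⟩ := pvMem_L n ht
    have hb := (pvCell_spec n k j hk hj).1
    unfold pvCells
    simp only [List.mem_flatMap, List.mem_map, PySem.List.mem_pyRange_one]
    exact ⟨(pvCellAt (pvP n k) (k % 3) j).1, ⟨by omega, by omega⟩,
      (pvCellAt (pvP n k) (k % 3) j).2.1, ⟨by omega, by omega⟩, rfl⟩
  have hlen : (pvCells n).length ≤ ((pvL n).map pvKey).length := by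
    rw [List.length_map, pvLen_eq n]
  exact (List.subperm_of_subset hnodup hsub).perm_of_length_le hlen

lemma pvL_eq_map_triple (n : Int) :
    pvL n = ((pvL n).map pvKey).map (pvTriple n) := by
  rw [List.map_map]
  conv_lhs => rw [← List.map_id (pvL n)]
  refine List.map_congr_left (fun t ht => ?_)
  obtain ⟨k, j, hk, hj, rfl⟩ := pvMem_L n ht
  have h3 := (pvCell_spec n k j hk hj).2.2
  show _ = pvTriple n (pvKey _)
  refine Prod.ext rfl (Prod.ext rfl ?_)
  exact h3.symm

lemma pvCells_pairwise (n : Int) :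
    (pvCells n).Pairwise (fun a b => a.1 < b.1 ∨ (a.1 = b.1 ∧ a.2 < b.2)) := by
  unfold pvCells
  rw [List.pairwise_flatMap]
  constructor
  · intro x _
    refine List.Pairwise.map _ ?_ (PySem.List.pairwise_lt_pyRange_one 0 (x + 1))
    intro a b hab
    exact Or.inr ⟨rfl, hab⟩
  · refine List.Pairwise.imp ?_ (PySem.List.pairwise_lt_pyRange_one 0 n)
    intro x1 x2 h p hp q hq
    simp only [List.mem_map] at hp hq
    obtain ⟨y1, _, rfl⟩ := hp
    obtain ⟨y2, _, rfl⟩ := hq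
    exact Or.inl h

lemma pv_sorted_eq_cand (n : Int) :
    PySem.List.sorted2 (pvL n) (fun t => t.1) (fun t => t.2.1)
      = (pvCells n).map (pvTriple n) := by
  rw [pv_sorted2_eq_sorted_lex]
  apply PySem.List.sorted_eq_of_perm_of_pairwise_lt
  · have h := (pvKeys_perm n).map (pvTriple n)
    rw [← pvL_eq_map_triple] at h
    exact h.symm
  · refine List.Pairwise.map _ ?_ (pvCells_pairwise n)
    intro a b hab
    simp only [pvTriple, Prod.Lex.toLex_lt_toLex]
    exact hab

lemma pv_alt_eq (n : Int) :
    solution_alt n = ((pvCells n).map (pvTriple n)).map (fun t => t.2.2) := by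
  simp only [solution_alt, pvCells, List.map_flatMap, List.map_map]
  rfl

-- ===== VERDICT (by name: the statement is the Claim_ definition above) =====
theorem solution_spec : Claim_equal_solution := by
  intro n _
  show solution n = solution_alt n
  rw [pv_solution_eq, pv_sorted_eq_cand, pv_alt_eq]
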